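-- pv_equiv track=rewrite | github.com/riteshnaikm/aitools5 | app.py | get_default_interview_questions
-- ===== SOURCE A (Python) =====
-- def get_default_interview_questions(job_title):
--     """Generate default interview questions based on job title"""
--     # Default technical questions based on common job titles
--     technical_questions = {
--         "software": [
--             "Describe your experience with different programming languages and frameworks.",
--             "How do you approach debugging a complex issue in your code?",
--             "Explain your understanding of object-oriented programming principles.",
--             "How do you ensure code quality and maintainability?",
--             "Describe a challenging technical problem you solved recently."
--         ],
--         "data": [
--             "Explain the difference between supervised and unsupervised learning.",
--             "How do you handle missing or inconsistent data in your analysis?",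
--             "Describe your experience with SQL and database optimization.",
--             "What tools and libraries do you use for data visualization?",
--             "How do you validate the results of your data analysis?"
--         ],
--         "manager": [
--             "How do you approach resource allocation in a project?",
--             "Describe your experience with agile methodologies.",
--             "How do you handle conflicts within your team?",
--             "What metrics do you use to measure project success?",
--             "How do you ensure your team meets deadlines and quality standards?"
--         ],
--         "analyst": [
--             "Describe your approach to gathering requirements from stakeholders.",
--             "How do you prioritize features or improvements?",
--             "What tools do you use for data analysis and reporting?",
--             "How do you communicate complex findings to non-technical stakeholders?",
--             "Describe a situation where your analysis led to a significant business decision."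
--         ],
--         "designer": [
--             "How do you approach the design process for a new project?",
--             "Describe your experience with different design tools and software.",
--             "How do you incorporate user feedback into your designs?",
--             "How do you balance aesthetics with functionality?",
--             "Describe a design challenge you faced and how you overcame it."
--         ]
--     }
--
--     # Default non-technical questions
--     nontechnical_questions = [
--         "How do you prioritize your work when dealing with multiple deadlines?",
--         "Describe a situation where you had to collaborate with a difficult team member.",
--         "How do you stay updated with the latest trends and developments in your field?",
--         "Describe your ideal work environment and company culture.",
--         "How do you handle feedback and criticism?"
--     ]
--
--     # Determine which set of technical questions to use based on job title
--     job_title_lower = job_title.lower()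
--     selected_technical_questions = []
--
--     if any(keyword in job_title_lower for keyword in ["developer", "engineer", "programmer", "software", "code", "web"]):
--         selected_technical_questions = technical_questions["software"]
--     elif any(keyword in job_title_lower for keyword in ["data", "analytics", "scientist", "ml", "ai"]):
--         selected_technical_questions = technical_questions["data"]
--     elif any(keyword in job_title_lower for keyword in ["manager", "director", "lead", "head"]):
--         selected_technical_questions = technical_questions["manager"]
--     elif any(keyword in job_title_lower for keyword in ["analyst", "business", "product"]):
--         selected_technical_questions = technical_questions["analyst"]
--     elif any(keyword in job_title_lower for keyword in ["designer", "ux", "ui", "graphic"]):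
--         selected_technical_questions = technical_questions["designer"]
--     else:
--         # If no match, use a mix of questions
--         selected_technical_questions = [
--             technical_questions["software"][0],
--             technical_questions["analyst"][0],
--             technical_questions["manager"][0],
--             "Describe your technical skills that are most relevant to this position.",
--             "What technical challenges are you looking forward to tackling in this role?"
--         ]
--
--     return selected_technical_questions, nontechnical_questions
-- ===== SOURCE B (Python) =====
-- # B: single flat pass over a keyword->rank table keeping the best (smallest) rank,
-- # instead of A's per-category if/elif chain of any() scans.
--
-- TECHNICAL_QUESTIONS = {
--     "software": [
--         "Describe your experience with different programming languages and frameworks.",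
--         "How do you approach debugging a complex issue in your code?",
--         "Explain your understanding of object-oriented programming principles.",
--         "How do you ensure code quality and maintainability?",
--         "Describe a challenging technical problem you solved recently."
--     ],
--     "data": [
--         "Explain the difference between supervised and unsupervised learning.",
--         "How do you handle missing or inconsistent data in your analysis?",
--         "Describe your experience with SQL and database optimization.",
--         "What tools and libraries do you use for data visualization?",
--         "How do you validate the results of your data analysis?"
--     ],
--     "manager": [
--         "How do you approach resource allocation in a project?",
--         "Describe your experience with agile methodologies.",
--         "How do you handle conflicts within your team?",
--         "What metrics do you use to measure project success?",
--         "How do you ensure your team meets deadlines and quality standards?"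
--     ],
--     "analyst": [
--         "Describe your approach to gathering requirements from stakeholders.",
--         "How do you prioritize features or improvements?",
--         "What tools do you use for data analysis and reporting?",
--         "How do you communicate complex findings to non-technical stakeholders?",
--         "Describe a situation where your analysis led to a significant business decision."
--     ],
--     "designer": [
--         "How do you approach the design process for a new project?",
--         "Describe your experience with different design tools and software.",
--         "How do you incorporate user feedback into your designs?",
--         "How do you balance aesthetics with functionality?",
--         "Describe a design challenge you faced and how you overcame it."
--     ]
-- }
--
-- NONTECHNICAL_QUESTIONS = [
--     "How do you prioritize your work when dealing with multiple deadlines?",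
--     "Describe a situation where you had to collaborate with a difficult team member.",
--     "How do you stay updated with the latest trends and developments in your field?",
--     "Describe your ideal work environment and company culture.",
--     "How do you handle feedback and criticism?"
-- ]
--
-- FALLBACK_QUESTIONS = [
--     TECHNICAL_QUESTIONS["software"][0],
--     TECHNICAL_QUESTIONS["analyst"][0],
--     TECHNICAL_QUESTIONS["manager"][0],
--     "Describe your technical skills that are most relevant to this position.",
--     "What technical challenges are you looking forward to tackling in this role?"
-- ]
--
-- CATEGORIES = ["software", "data", "manager", "analyst", "designer"]
--
-- # flat keyword -> category-rank table (rank = index into CATEGORIES; smaller = higher priority)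
-- KEYWORD_RANKS = [
--     ("developer", 0), ("engineer", 0), ("programmer", 0), ("software", 0), ("code", 0), ("web", 0),
--     ("data", 1), ("analytics", 1), ("scientist", 1), ("ml", 1), ("ai", 1),
--     ("manager", 2), ("director", 2), ("lead", 2), ("head", 2),
--     ("analyst", 3), ("business", 3), ("product", 3),
--     ("designer", 4), ("ux", 4), ("ui", 4), ("graphic", 4),
-- ]
--
--
-- def _pick(best):
--     if best is None:
--         return FALLBACK_QUESTIONS, NONTECHNICAL_QUESTIONS
--     return TECHNICAL_QUESTIONS[CATEGORIES[best]], NONTECHNICAL_QUESTIONS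
--
--
-- def get_default_interview_questions(job_title):
--     """Generate default interview questions based on job title (best-rank scan version)."""
--     jl = job_title.lower()
--     best = None
--     for kw, rank in KEYWORD_RANKS:
--         if kw in jl:
--             if best is None or rank < best:
--                 best = rank
--     return _pick(best)
-- ===== Notes on version B (the rewrite author's own statement) =====
-- stated objective: alternative
-- what changed: Replaces the five-branch if/elif chain of per-category any() scans by a single flat pass over a keyword->rank table that keeps the smallest matching category rank in an accumulator, then selects the question set (or the fallback mix) from that best rank.
import Mathlib
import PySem

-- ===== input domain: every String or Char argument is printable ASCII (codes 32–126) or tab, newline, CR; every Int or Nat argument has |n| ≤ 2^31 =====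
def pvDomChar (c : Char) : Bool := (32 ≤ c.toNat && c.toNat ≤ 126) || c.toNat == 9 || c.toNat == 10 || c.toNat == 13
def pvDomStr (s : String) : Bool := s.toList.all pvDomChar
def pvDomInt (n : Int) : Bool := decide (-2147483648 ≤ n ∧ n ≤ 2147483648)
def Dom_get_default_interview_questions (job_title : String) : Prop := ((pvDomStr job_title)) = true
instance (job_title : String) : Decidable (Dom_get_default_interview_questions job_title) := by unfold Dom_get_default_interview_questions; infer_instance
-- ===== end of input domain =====

-- B replaces A's per-category if/elif chain of any() scans by ONE flat pass over a
-- keyword→rank table keeping the smallest matching rank (alternative; same cost).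

-- ===== PORT A =====
def get_default_interview_questions (job_title : String) : List String × List String :=
  let technical_questions : PySem.Dict String (List String) := PySem.Dict.ofList [
    ("software", [
      "Describe your experience with different programming languages and frameworks.",
      "How do you approach debugging a complex issue in your code?",
      "Explain your understanding of object-oriented programming principles.",
      "How do you ensure code quality and maintainability?",
      "Describe a challenging technical problem you solved recently."]),
    ("data", [
      "Explain the difference between supervised and unsupervised learning.",
      "How do you handle missing or inconsistent data in your analysis?",
      "Describe your experience with SQL and database optimization.",
      "What tools and libraries do you use for data visualization?",
      "How do you validate the results of your data analysis?"]),
    ("manager", [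
      "How do you approach resource allocation in a project?",
      "Describe your experience with agile methodologies.",
      "How do you handle conflicts within your team?",
      "What metrics do you use to measure project success?",
      "How do you ensure your team meets deadlines and quality standards?"]),
    ("analyst", [
      "Describe your approach to gathering requirements from stakeholders.",
      "How do you prioritize features or improvements?",
      "What tools do you use for data analysis and reporting?",
      "How do you communicate complex findings to non-technical stakeholders?",
      "Describe a situation where your analysis led to a significant business decision."]),
    ("designer", [
      "How do you approach the design process for a new project?",
      "Describe your experience with different design tools and software.",
      "How do you incorporate user feedback into your designs?",
      "How do you balance aesthetics with functionality?",
      "Describe a design challenge you faced and how you overcame it."])]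
  let nontechnical_questions : List String := [
    "How do you prioritize your work when dealing with multiple deadlines?",
    "Describe a situation where you had to collaborate with a difficult team member.",
    "How do you stay updated with the latest trends and developments in your field?",
    "Describe your ideal work environment and company culture.",
    "How do you handle feedback and criticism?"]
  let job_title_lower := PySem.Str.lower job_title
  -- dict subscripts are on literal keys always present; getD [] is exact here
  let selected_technical_questions : List String :=
    if (["developer", "engineer", "programmer", "software", "code", "web"].any
        (fun keyword => PySem.Str.isIn keyword job_title_lower)) then
      technical_questions.getD "software" []
    else if (["data", "analytics", "scientist", "ml", "ai"].any
        (fun keyword => PySem.Str.isIn keyword job_title_lower)) then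
      technical_questions.getD "data" []
    else if (["manager", "director", "lead", "head"].any
        (fun keyword => PySem.Str.isIn keyword job_title_lower)) then
      technical_questions.getD "manager" []
    else if (["analyst", "business", "product"].any
        (fun keyword => PySem.Str.isIn keyword job_title_lower)) then
      technical_questions.getD "analyst" []
    else if (["designer", "ux", "ui", "graphic"].any
        (fun keyword => PySem.Str.isIn keyword job_title_lower)) then
      technical_questions.getD "designer" []
    else
      [(technical_questions.getD "software" []).getD 0 "",
       (technical_questions.getD "analyst" []).getD 0 "",
       (technical_questions.getD "manager" []).getD 0 "",
       "Describe your technical skills that are most relevant to this position.",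
       "What technical challenges are you looking forward to tackling in this role?"]
  (selected_technical_questions, nontechnical_questions)

-- ===== PORT B =====
def pvTechnicalQuestions : PySem.Dict String (List String) := PySem.Dict.ofList [
  ("software", [
    "Describe your experience with different programming languages and frameworks.",
    "How do you approach debugging a complex issue in your code?",
    "Explain your understanding of object-oriented programming principles.",
    "How do you ensure code quality and maintainability?",
    "Describe a challenging technical problem you solved recently."]),
  ("data", [
    "Explain the difference between supervised and unsupervised learning.",
    "How do you handle missing or inconsistent data in your analysis?",
    "Describe your experience with SQL and database optimization.",
    "What tools and libraries do you use for data visualization?",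
    "How do you validate the results of your data analysis?"]),
  ("manager", [
    "How do you approach resource allocation in a project?",
    "Describe your experience with agile methodologies.",
    "How do you handle conflicts within your team?",
    "What metrics do you use to measure project success?",
    "How do you ensure your team meets deadlines and quality standards?"]),
  ("analyst", [
    "Describe your approach to gathering requirements from stakeholders.",
    "How do you prioritize features or improvements?",
    "What tools do you use for data analysis and reporting?",
    "How do you communicate complex findings to non-technical stakeholders?",
    "Describe a situation where your analysis led to a significant business decision."]),
  ("designer", [
    "How do you approach the design process for a new project?",
    "Describe your experience with different design tools and software.",
    "How do you incorporate user feedback into your designs?",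
    "How do you balance aesthetics with functionality?",
    "Describe a design challenge you faced and how you overcame it."])]

def pvNontechnicalQuestions : List String := [
  "How do you prioritize your work when dealing with multiple deadlines?",
  "Describe a situation where you had to collaborate with a difficult team member.",
  "How do you stay updated with the latest trends and developments in your field?",
  "Describe your ideal work environment and company culture.",
  "How do you handle feedback and criticism?"]

def pvFallbackQuestions : List String := [
  (pvTechnicalQuestions.getD "software" []).getD 0 "",
  (pvTechnicalQuestions.getD "analyst" []).getD 0 "",
  (pvTechnicalQuestions.getD "manager" []).getD 0 "",
  "Describe your technical skills that are most relevant to this position.",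
  "What technical challenges are you looking forward to tackling in this role?"]

def pvCategories : List String := ["software", "data", "manager", "analyst", "designer"]

-- flat keyword → category-rank table (rank = index into pvCategories)
def pvKeywordRanks : List (String × Nat) := [
  ("developer", 0), ("engineer", 0), ("programmer", 0), ("software", 0), ("code", 0), ("web", 0),
  ("data", 1), ("analytics", 1), ("scientist", 1), ("ml", 1), ("ai", 1),
  ("manager", 2), ("director", 2), ("lead", 2), ("head", 2),
  ("analyst", 3), ("business", 3), ("product", 3),
  ("designer", 4), ("ux", 4), ("ui", 4), ("graphic", 4)]

-- one loop iteration of B: keep the smallest rank whose keyword occurs in jl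
def pvStep (jl : String) (best : Option Nat) (p : String × Nat) : Option Nat :=
  if PySem.Str.isIn p.1 jl then
    match best with
    | none => some p.2
    | some b => if p.2 < b then some p.2 else some b
  else best

-- B's _pick helper
def pvPick : Option Nat → List String × List String
  | some r => (pvTechnicalQuestions.getD (pvCategories.getD r "") [], pvNontechnicalQuestions)
  | none => (pvFallbackQuestions, pvNontechnicalQuestions)

def get_default_interview_questions_alt (job_title : String) : List String × List String :=
  pvPick (pvKeywordRanks.foldl (pvStep (PySem.Str.lower job_title)) none)

-- ===== PRECONDITION & SPEC =====
def Spec_get_default_interview_questions (job_title : String) (out : List String × List String) : Prop := out = get_default_interview_questions_alt job_title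
instance (job_title : String) (out : List String × List String) : Decidable (Spec_get_default_interview_questions job_title out) := by unfold Spec_get_default_interview_questions; infer_instance

-- ===== CLAIM (what is proved, stated in full; the proofs are below) =====
def Claim_equal_get_default_interview_questions : Prop := ∀ (job_title : String), Dom_get_default_interview_questions job_title → Spec_get_default_interview_questions job_title (get_default_interview_questions job_title)

-- ===== LEMMAS AND PROOFS =====

-- proof-side spelling of "rank of the first matching keyword" as nested ifs
def pvFirstRank (jl : String) : List (String × Nat) → Option Nat
  | [] => none
  | p :: t => if PySem.Str.isIn p.1 jl then some p.2 else pvFirstRank jl t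

-- once best = some r and all remaining ranks are ≥ r, the fold keeps some r
theorem pvFoldl_keep (jl : String) (r : Nat) (l : List (String × Nat))
    (h : ∀ p ∈ l, r ≤ p.2) : l.foldl (pvStep jl) (some r) = some r := by
  induction l with
  | nil => rfl
  | cons p t ih =>
      have hr : r ≤ p.2 := h p (List.mem_cons_self ..)
      have hstep : pvStep jl (some r) p = some r := by
        unfold pvStep
        by_cases h1 : PySem.Str.isIn p.1 jl
      -- matched: rank not smaller, keep; unmatched: keep
        · rw [if_pos h1]
          show (if p.2 < r then some p.2 else some r) = some r
          rw [if_neg (by omega)]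
        · rw [if_neg h1]
      simp only [List.foldl_cons, hstep]
      exact ih (fun q hq => h q (List.mem_cons_of_mem _ hq))

-- with ranks nondecreasing, B's min-fold is the rank of the FIRST matching keyword
theorem pvFoldl_eq_firstRank (jl : String) (l : List (String × Nat))
    (h : l.Pairwise fun p q => p.2 ≤ q.2) :
    l.foldl (pvStep jl) none = pvFirstRank jl l := by
  induction l with
  | nil => rfl
  | cons p t ih =>
      rw [List.pairwise_cons] at h
      by_cases hm : PySem.Str.isIn p.1 jl
      · have hstep : pvStep jl none p = some p.2 := by unfold pvStep; rw [if_pos hm]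
        simp only [List.foldl_cons, hstep, pvFirstRank]
        rw [if_pos hm]
        exact pvFoldl_keep jl p.2 t h.1
      · have hstep : pvStep jl none p = none := by unfold pvStep; rw [if_neg hm]
        simp only [List.foldl_cons, hstep, pvFirstRank]
        rw [if_neg hm]
        exact ih h.2

-- collapse nested ifs with the same 'then' into the Bool-or of A's any() unfolding
theorem pvIfCollapse {α : Type} (a b : Bool) (x y : α) :
    (if a then x else if b then x else y) = (if (a || b) then x else y) := by
  cases a <;> simp

-- ===== VERDICT (by name: the statement is the Claim_ definition above) =====
theorem get_default_interview_questions_spec : Claim_equal_get_default_interview_questions := by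
  intro job_title _
  unfold Spec_get_default_interview_questions get_default_interview_questions
    get_default_interview_questions_alt
  rw [pvFoldl_eq_firstRank _ _ (by unfold pvKeywordRanks; decide)]
  unfold pvKeywordRanks
  simp only [pvFirstRank, pvIfCollapse, apply_ite pvPick,
    List.any_cons, List.any_nil, Bool.or_false]
  split_ifs <;> rfl
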